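-- pv_equiv track=rewrite | github.com/liuxinyuanxy/QRCode-generator | Hydra.py | coding_bit_stream
-- ===== SOURCE A (Python) =====
-- def char_to_val(x):  # 使用Alphanumeric编码
--     dict = {
--         ' ': 36,
--         '$': 37,
--         '%': 38,
--         '*': 39,
--         '+': 40,
--         '-': 41,
--         '.': 42,
--         '/': 43,
--         ':': 44
--     }
--     if '0' <= x <= '9':
--         return int(x)
--     elif 'A' <= x <= 'Z':
--         return ord(x) - ord('A') + 10
--     else:
--         return dict[x]
--
-- def coding_bit_stream(str):  # 使用Alphanumeric获得的数据流的头部信息和数据部分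
--     ans = '0010'  # 编码方式
--     length = len(str)
--     ans = ans + '{:09b}'.format(length)  # 长度转二进制，不足9位补0
--     for idx in range(0, length, 2):
--         if idx == length - 1:
--             continue
--         ans = ans + '{:011b}'.format(  # 数据串中两位字符一组转二进制，不足11位补0
--             char_to_val(str[idx]) * 45 + char_to_val(str[idx + 1]))
--     if length & 1:  # 多出来一个字符
--         ans = ans + '{:06b}'.format(char_to_val(str[length - 1]))
--     return ans
-- ===== SOURCE B (Python) =====
-- # Different algorithm: instead of concatenating formatted bit-strings, accumulate
-- # the whole stream as ONE big integer together with its intended bit-width, then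
-- # format it once; the '0010' header, length field, 11-bit pairs and 6-bit tail are
-- # shifted in arithmetically (each value provably fits its field width).
-- ALNUM_VAL = {c: i for i, c in enumerate("0123456789ABCDEFGHIJKLMNOPQRSTUVWXYZ $%*+-./:")}
--
--
-- def coding_bit_stream(str):
--     n = len(str)
--     lw = max(9, n.bit_length())   # the length field widens beyond 9 bits exactly like '{:09b}'
--     acc = 2 * 2 ** lw + n         # '0010' header followed by the length field
--     width = 4 + lw
--     i = 0
--     while i + 1 < n:
--         acc = acc * 2048 + 45 * ALNUM_VAL[str[i]] + ALNUM_VAL[str[i + 1]]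
--         width += 11
--         i += 2
--     if i < n:
--         acc = acc * 64 + ALNUM_VAL[str[i]]
--         width += 6
--     return format(acc, '0{}b'.format(width))
-- ===== Notes on version B (the rewrite author's own statement) =====
-- stated objective: alternative
-- what changed: Replaces A's piecewise string building (stepped-index loop with a continue-guard appending formatted bit-strings) by arithmetic accumulation of the entire stream in one big integer with an explicit running bit-width -- header, length field, 11-bit pairs and 6-bit odd tail are shifted in numerically -- formatted to binary exactly once at the end; character values come from one precomputed dict (KeyError on invalid chars, like A).
import Mathlib
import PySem

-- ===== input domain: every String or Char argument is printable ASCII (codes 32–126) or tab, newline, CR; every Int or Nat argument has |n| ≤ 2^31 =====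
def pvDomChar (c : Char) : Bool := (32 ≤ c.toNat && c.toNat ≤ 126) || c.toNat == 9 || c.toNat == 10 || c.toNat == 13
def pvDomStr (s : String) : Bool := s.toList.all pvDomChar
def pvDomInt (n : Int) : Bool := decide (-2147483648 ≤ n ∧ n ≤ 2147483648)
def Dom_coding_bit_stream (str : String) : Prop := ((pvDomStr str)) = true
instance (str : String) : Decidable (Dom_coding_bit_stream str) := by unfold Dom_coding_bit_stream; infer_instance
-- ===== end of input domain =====

-- B replaces A's piecewise string concatenation by arithmetic accumulation: the whole bit
-- stream is built as one big integer with a running bit-width and formatted to binary once.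


-- shared format helper: '{:0wb}'.format(n) = binary digits left-padded with '0' to width w
def pvFmtB (w : Int) (n : Int) : List Char := PySem.Chars.zfill (PySem.Int.toBinChars n) w

-- ===== PORT A =====
def pvCtvDict : PySem.Dict Char Int :=
  PySem.Dict.ofList [(' ', 36), ('$', 37), ('%', 38), ('*', 39), ('+', 40), ('-', 41), ('.', 42), ('/', 43), (':', 44)]

def char_to_val (x : Char) : Int :=
  if '0' ≤ x ∧ x ≤ '9' then (x.toNat : Int) - 48        -- int(x) on a digit character
  else if 'A' ≤ x ∧ x ≤ 'Z' then (x.toNat : Int) - ('A'.toNat : Int) + 10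
  else PySem.Dict.getD pvCtvDict x 0                     -- dict[x]; KeyError excluded by Pre_

def coding_bit_stream (str : String) : String :=
  let cs := str.toList
  let length : Int := PySem.Str.len str
  let ans := "0010".toList ++ pvFmtB 9 length
  let ans := (PySem.List.pyRange 0 length 2).foldl
    (fun ans idx =>
      if idx = length - 1 then ans
      else ans ++ pvFmtB 11 (char_to_val (PySem.List.pyGetD cs idx ' ') * 45
                              + char_to_val (PySem.List.pyGetD cs (idx + 1) ' '))) ans
  let ans := if PySem.Int.band length 1 ≠ 0
    then ans ++ pvFmtB 6 (char_to_val (PySem.List.pyGetD cs (length - 1) ' '))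
    else ans
  String.ofList ans

-- ===== PORT B =====
def pvAlnum : List Char := "0123456789ABCDEFGHIJKLMNOPQRSTUVWXYZ $%*+-./:".toList

-- ALNUM_VAL = {c: i for i, c in enumerate(alphabet)}  (pairs (char, index), insertion order)
def pvBVals : PySem.Dict Char Int :=
  PySem.Dict.ofList (pvAlnum.zipIdx.map (fun p => (p.1, (p.2 : Int))))

-- ALNUM_VAL[c]; KeyError on a char outside the alphabet is excluded by Pre_
def pvVal (c : Char) : Int := PySem.Dict.getD pvBVals c 0

-- the while-loop: consume two chars at a time, shifting their pair value into acc;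
-- the final 'if i < n' branch is the one-char-left case of the recursion
def pvBLoop : List Char → Int → Int → Int × Int
  | a :: b :: rest, acc, w => pvBLoop rest (acc * 2048 + 45 * pvVal a + pvVal b) (w + 11)
  | [a], acc, w => (acc * 64 + pvVal a, w + 6)
  | [], acc, w => (acc, w)

def coding_bit_stream_alt (str : String) : String :=
  let cs := str.toList
  let n : Int := (cs.length : Int)
  let lw : Int := max 9 ((PySem.Int.bitLength n : Nat) : Int)   -- max(9, n.bit_length())
  let acc0 : Int := 2 * 2 ^ lw.toNat + n                        -- 2 * 2 ** lw + n (lw ≥ 9 ≥ 0)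
  let r := pvBLoop cs acc0 (4 + lw)
  String.ofList (pvFmtB r.2 r.1)                                -- format(acc, '0{}b'.format(width))

-- ===== PRECONDITION & SPEC =====
-- Pre_: every character is QR-alphanumeric (digit, uppercase letter, or one of " $%*+-./:");
-- on any other character A raises KeyError.
def Pre_coding_bit_stream (str : String) : Prop := (str.toList.all fun c => pvAlnum.contains c) = true
instance (str : String) : Decidable (Pre_coding_bit_stream str) := by unfold Pre_coding_bit_stream; infer_instance

def pvWitness_coding_bit_stream : String := "HELLO WORLD"

def Spec_coding_bit_stream (str : String) (out : String) : Prop := out = coding_bit_stream_alt str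
instance (str : String) (out : String) : Decidable (Spec_coding_bit_stream str out) := by unfold Spec_coding_bit_stream; infer_instance

-- ===== CLAIM (what is proved, stated in full; the proofs are below) =====
def Claim_equal_coding_bit_stream : Prop := ∀ (str : String), Dom_coding_bit_stream str → Pre_coding_bit_stream str → Spec_coding_bit_stream str (coding_bit_stream str)

-- ===== LEMMAS AND PROOFS =====

-- A's data section as a function of the value list: 11-bit pair pieces and a 6-bit odd tail
def pvBody : List Int → List Char
  | a :: b :: rest => pvFmtB 11 (a * 45 + b) ++ pvBody rest
  | [x] => pvFmtB 6 x
  | [] => []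

lemma pv_alnum_eq : pvAlnum = ['0','1','2','3','4','5','6','7','8','9','A','B','C','D','E','F','G','H','I','J','K','L','M','N','O','P','Q','R','S','T','U','V','W','X','Y','Z',' ','$','%','*','+','-','.','/',':'] := by
  decide

-- on alphabet characters B's dict lookup agrees with A's char_to_val
set_option maxRecDepth 4096 in
lemma pv_val_eq : ∀ c ∈ pvAlnum, pvVal c = char_to_val c := by
  intro c hc
  rw [pv_alnum_eq] at hc
  simp only [List.mem_cons, List.not_mem_nil, or_false] at hc
  rcases hc with h|h|h|h|h|h|h|h|h|h|h|h|h|h|h|h|h|h|h|h|h|h|h|h|h|h|h|h|h|h|h|h|h|h|h|h|h|h|h|h|h|h|h|h|h <;> subst h <;> decide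

lemma pv_ctv_bound : ∀ c ∈ pvAlnum, 0 ≤ char_to_val c ∧ char_to_val c ≤ 44 := by
  intro c hc
  rw [pv_alnum_eq] at hc
  simp only [List.mem_cons, List.not_mem_nil, or_false] at hc
  rcases hc with h|h|h|h|h|h|h|h|h|h|h|h|h|h|h|h|h|h|h|h|h|h|h|h|h|h|h|h|h|h|h|h|h|h|h|h|h|h|h|h|h|h|h|h|h <;> subst h <;> decide

-- ---------- binary digits: Nat.toDigits 2 as a structural recursion ----------
def pvBin (n : Nat) : List Char :=
  if n < 2 then [Nat.digitChar n] else pvBin (n / 2) ++ [Nat.digitChar (n % 2)]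
decreasing_by omega

lemma pvBin_toDigitsCore : ∀ (fuel n : Nat) (ds : List Char), n < 2 ^ fuel →
    Nat.toDigitsCore 2 (fuel + 1) n ds = pvBin n ++ ds := by
  intro fuel
  induction fuel with
  | zero =>
    intro n ds h
    interval_cases n
    simp [Nat.toDigitsCore, pvBin]
  | succ f ih =>
    intro n ds h
    rw [Nat.toDigitsCore]
    by_cases h2 : n < 2
    · have : n / 2 = 0 := by omega
      rw [if_pos this, pvBin, if_pos h2]
      have : n % 2 = n := by omega
      rw [this]
      simp
    · have hne : ¬ n / 2 = 0 := by omega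
      rw [if_neg hne, ih (n / 2) _ (by
        have : 2 ^ (f + 1) = 2 ^ f * 2 := by ring
        omega)]
      conv_rhs => rw [pvBin, if_neg h2]
      simp

lemma pvBin_toDigits (n : Nat) : Nat.toDigits 2 n = pvBin n := by
  have h := pvBin_toDigitsCore n n [] (Nat.lt_two_pow_self)
  simpa [Nat.toDigits] using h

lemma toBinChars_nonneg (v : Int) (h : 0 ≤ v) : PySem.Int.toBinChars v = pvBin v.toNat := by
  rw [PySem.Int.toBinChars, if_neg (by omega), pvBin_toDigits]

lemma pvBin_mem (n : Nat) : ∀ c ∈ pvBin n, c = '0' ∨ c = '1' := by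
  induction n using Nat.strong_induction_on with
  | _ n ih =>
    intro c hc
    rw [pvBin] at hc
    by_cases h2 : n < 2
    · rw [if_pos h2] at hc
      interval_cases n <;> simp_all [Nat.digitChar]
    · rw [if_neg h2] at hc
      rcases List.mem_append.mp hc with h | h
      · exact ih (n / 2) (by omega) c h
      · have : n % 2 < 2 := by omega
        interval_cases hm : n % 2 <;> simp_all [Nat.digitChar]

lemma pvBin_ne_nil (n : Nat) : pvBin n ≠ [] := by
  rw [pvBin]
  split <;> simp

lemma pv_bl_pos (m : Nat) (h : 1 ≤ m) : 1 ≤ PySem.Int.bitLength (m : Int) := by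
  rw [PySem.Int.bitLength_natCast (by omega)]
  omega

lemma pvBin_length (n : Nat) : (pvBin n).length = max 1 (PySem.Int.bitLength (n : Int)) := by
  induction n using Nat.strong_induction_on with
  | _ n ih =>
    rw [pvBin]
    by_cases h2 : n < 2
    · rw [if_pos h2]
      interval_cases n <;> decide
    · rw [if_neg h2]
      have hrec := ih (n / 2) (by omega)
      have hpos := pv_bl_pos (n / 2) (by omega)
      rw [PySem.Int.bitLength_natCast (by omega), List.length_append, hrec]
      simp only [List.length_singleton]
      rw [Nat.max_eq_right hpos]
      exact (Nat.max_eq_right (by omega)).symm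

lemma pv_bl_le (V k : Nat) (h : V < 2 ^ k) : PySem.Int.bitLength (V : Int) ≤ k := by
  by_contra hlt
  have hV : V ≠ 0 := by
    intro h0; subst h0; simp at hlt
  have h1 : (V : Int) ≠ 0 := by exact_mod_cast hV
  have h2 := PySem.Int.two_pow_bitLength_le (V : Int) h1
  have h3 : 2 ^ k ≤ 2 ^ (PySem.Int.bitLength (V : Int) - 1) :=
    Nat.pow_le_pow_right (by omega) (by omega)
  simp [Int.natAbs_natCast] at h2
  omega

lemma pvBin_length_le (V k : Nat) (hk : 1 ≤ k) (h : V < 2 ^ k) : (pvBin V).length ≤ k := by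
  rw [pvBin_length]
  exact max_le hk (pv_bl_le V k h)

-- zfill on a nonempty all-digit list is plain left padding (for any target width)
lemma pv_zfill_digits (cs : List Char) (w : Int) (hne : cs ≠ [])
    (hd : ∀ c ∈ cs, c = '0' ∨ c = '1') :
    PySem.Chars.zfill cs w = List.replicate (w.toNat - cs.length) '0' ++ cs := by
  rw [PySem.Chars.zfill.eq_def]
  by_cases hle : w ≤ (cs.length : Int)
  · rw [if_pos hle]
    have : w.toNat - cs.length = 0 := by omega
    rw [this]
    simp
  · rw [if_neg hle]
    rcases cs with _ | ⟨c, rest⟩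
    · exact absurd rfl hne
    · have hc := hd c (by simp)
      have : ¬ (c = '+' ∨ c = '-') := by rcases hc with h | h <;> subst h <;> decide
      simp [this]

-- ---------- the field-append law: shifting a k-bit value into a positive accumulator ----------
lemma pvBin_field : ∀ (k : Nat), 1 ≤ k → ∀ (a v : Nat), 1 ≤ a → v < 2 ^ k →
    pvBin (a * 2 ^ k + v) = pvBin a ++ (List.replicate (k - (pvBin v).length) '0' ++ pvBin v) := by
  intro k
  induction k with
  | zero => omega
  | succ k ih =>
    intro _ a v ha hv
    by_cases hk0 : k = 0
    · subst hk0
      have h2 : ¬ a * 2 ^ 1 + v < 2 := by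
        have : 1 * 2 ≤ a * 2 ^ 1 := by
          simpa using Nat.mul_le_mul_right 2 ha
        omega
      rw [pvBin, if_neg h2]
      have hd : (a * 2 ^ 1 + v) / 2 = a := by omega
      have hm : (a * 2 ^ 1 + v) % 2 = v := by omega
      rw [hd, hm]
      have hvb : pvBin v = [Nat.digitChar v] := by rw [pvBin, if_pos (by omega)]
      rw [hvb]
      simp
    · have hk1 : 1 ≤ k := by omega
      have hp : (2:Nat) ^ (k + 1) = 2 ^ k * 2 := by ring
      have h2 : ¬ a * 2 ^ (k + 1) + v < 2 := by
        have h4 : (4:Nat) ≤ 2 ^ (k + 1) := by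
          calc (4:Nat) = 2 ^ 2 := by norm_num
          _ ≤ 2 ^ (k + 1) := Nat.pow_le_pow_right (by omega) (by omega)
        nlinarith
      rw [pvBin, if_neg h2]
      have hq : (2:Nat) ^ k > 0 := Nat.pow_pos (by omega)
      have hd : (a * 2 ^ (k + 1) + v) / 2 = a * 2 ^ k + v / 2 := by
        have : a * 2 ^ (k + 1) = (a * 2 ^ k) * 2 := by ring
        omega
      have hm : (a * 2 ^ (k + 1) + v) % 2 = v % 2 := by
        have : a * 2 ^ (k + 1) = (a * 2 ^ k) * 2 := by ring
        omega
      rw [hd, hm, ih hk1 a (v / 2) ha (by omega)]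
      by_cases hv2 : v < 2
    -- small v: pvBin v is a single digit, v / 2 = 0 and pvBin 0 pads with one more zero
      · have hv0 : v / 2 = 0 := by omega
        have hvm : v % 2 = v := by omega
        have hvb : pvBin v = [Nat.digitChar v] := by rw [pvBin, if_pos hv2]
        have h0b : pvBin 0 = ['0'] := by rw [pvBin]; simp [Nat.digitChar]
        rw [hv0, hvm, h0b, hvb]
        simp only [List.length_singleton, List.append_assoc]
        have : List.replicate (k - 1) '0' ++ (['0'] ++ [Nat.digitChar v])
            = List.replicate (k + 1 - 1) '0' ++ [Nat.digitChar v] := by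
          have : List.replicate (k - 1) '0' ++ ['0'] = List.replicate k '0' := by
            have hk : k = (k - 1) + 1 := by omega
            rw [hk]
            simp [List.replicate_succ']
          rw [← List.append_assoc, this]
          simp
        rw [this]
      · have hvb : pvBin v = pvBin (v / 2) ++ [Nat.digitChar (v % 2)] := by
          rw [pvBin, if_neg hv2]
        rw [hvb, List.length_append, List.length_singleton]
        have hL : k + 1 - ((pvBin (v / 2)).length + 1) = k - (pvBin (v / 2)).length := by omega
        rw [hL]
        simp [List.append_assoc]

lemma toBin_field (a v : Int) (k : Nat) (ha : 1 ≤ a) (hk : 1 ≤ k) (hv0 : 0 ≤ v)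
    (hv : v < 2 ^ k) :
    PySem.Int.toBinChars (a * 2 ^ k + v)
      = PySem.Int.toBinChars a ++ PySem.Chars.zfill (PySem.Int.toBinChars v) (k : Int) := by
  obtain ⟨A, rfl⟩ : ∃ A : Nat, a = (A : Int) := ⟨a.toNat, by omega⟩
  obtain ⟨V, rfl⟩ : ∃ V : Nat, v = (V : Int) := ⟨v.toNat, by omega⟩
  have hA : 1 ≤ A := by exact_mod_cast ha
  have hV : V < 2 ^ k := by exact_mod_cast hv
  have hcast : ((A : Int) * 2 ^ k + (V : Int)) = ((A * 2 ^ k + V : Nat) : Int) := by push_cast; ring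
  rw [hcast, toBinChars_nonneg _ (by positivity), toBinChars_nonneg _ (by positivity),
      toBinChars_nonneg _ (by positivity)]
  simp only [Int.toNat_natCast]
  rw [pvBin_field k hk A V hA hV,
      pv_zfill_digits (pvBin V) (k : Int) (pvBin_ne_nil V) (pvBin_mem V)]
  simp

lemma toBin_field_length (a v : Int) (k : Nat) (ha : 1 ≤ a) (hk : 1 ≤ k) (hv0 : 0 ≤ v)
    (hv : v < 2 ^ k) :
    (PySem.Int.toBinChars (a * 2 ^ k + v)).length = (PySem.Int.toBinChars a).length + k := by
  rw [toBin_field a v k ha hk hv0 hv]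
  have hlen : (PySem.Int.toBinChars v).length ≤ k := by
    rw [toBinChars_nonneg v hv0]
    have h2k : ((2 ^ k : Nat) : Int) = 2 ^ k := by push_cast; rfl
    exact pvBin_length_le v.toNat k hk (by omega)
  rw [List.length_append, PySem.Chars.length_zfill]
  omega

-- ---------- characterization of B's accumulation loop ----------
lemma pv_loop_spec : ∀ (cs : List Char) (acc w : Int), 1 ≤ acc → (∀ c ∈ cs, c ∈ pvAlnum) →
    PySem.Int.toBinChars (pvBLoop cs acc w).1
        = PySem.Int.toBinChars acc ++ pvBody (cs.map char_to_val)
    ∧ (pvBLoop cs acc w).2 = w + ((pvBody (cs.map char_to_val)).length : Int)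
    ∧ 1 ≤ (pvBLoop cs acc w).1
  | [], acc, w, hacc, _ => by
      simp [pvBLoop, pvBody, hacc]
  | [a], acc, w, hacc, hmem => by
      have hb := pv_ctv_bound a (hmem a (by simp))
      have hv := pv_val_eq a (hmem a (by simp))
      have hfield := toBin_field acc (char_to_val a) 6 hacc (by omega) (by omega) (by norm_num; omega)
      have hlen := toBin_field_length acc (char_to_val a) 6 hacc (by omega) (by omega) (by norm_num; omega)
      refine ⟨?_, ?_, ?_⟩
      · show PySem.Int.toBinChars (acc * 64 + pvVal a) = _
        rw [hv]
        have : acc * 64 + char_to_val a = acc * 2 ^ 6 + char_to_val a := by norm_num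
        rw [this, hfield]
        rfl
      · show w + 6 = _
        have h6 : ((pvFmtB 6 (char_to_val a)).length : Int) = 6 := by
          unfold pvFmtB
          rw [PySem.Chars.length_zfill]
          have hle : (PySem.Int.toBinChars (char_to_val a)).length ≤ 6 := by
            rw [toBinChars_nonneg _ (by omega)]
            exact pvBin_length_le _ 6 (by omega) (by norm_num; omega)
          omega
        simp only [List.map_cons, List.map_nil]
        rw [show pvBody [char_to_val a] = pvFmtB 6 (char_to_val a) from rfl, h6]
      · show 1 ≤ acc * 64 + pvVal a
        rw [hv]
        nlinarith
  | a :: b :: rest, acc, w, hacc, hmem => by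
      have hba := pv_ctv_bound a (hmem a (by simp))
      have hbb := pv_ctv_bound b (hmem b (by simp))
      have hva := pv_val_eq a (hmem a (by simp))
      have hvb := pv_val_eq b (hmem b (by simp))
      have hvbound : 0 ≤ char_to_val a * 45 + char_to_val b ∧ char_to_val a * 45 + char_to_val b < 2 ^ 11 := by
        constructor <;> nlinarith
      have hacc' : 1 ≤ acc * 2048 + 45 * pvVal a + pvVal b := by
        rw [hva, hvb]; nlinarith
      have hrec := pv_loop_spec rest (acc * 2048 + 45 * pvVal a + pvVal b) (w + 11) hacc'
        (fun c hc => hmem c (by simp [hc]))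
      have hfield := toBin_field acc (char_to_val a * 45 + char_to_val b) 11 hacc (by omega)
        hvbound.1 hvbound.2
      have heq : acc * 2048 + 45 * pvVal a + pvVal b
          = acc * 2 ^ 11 + (char_to_val a * 45 + char_to_val b) := by
        rw [hva, hvb]; ring
      have hlen11 : ((pvFmtB 11 (char_to_val a * 45 + char_to_val b)).length : Int) = 11 := by
        unfold pvFmtB
        rw [PySem.Chars.length_zfill]
        have hle : (PySem.Int.toBinChars (char_to_val a * 45 + char_to_val b)).length ≤ 11 := by
          rw [toBinChars_nonneg _ hvbound.1]
          exact pvBin_length_le _ 11 (by omega) (by omega)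
        omega
      refine ⟨?_, ?_, hrec.2.2⟩
      · show PySem.Int.toBinChars (pvBLoop rest _ _).1 = _
        rw [hrec.1, heq, hfield]
        show _ = PySem.Int.toBinChars acc ++ (pvFmtB 11 (char_to_val a * 45 + char_to_val b) ++ pvBody (rest.map char_to_val))
        simp [pvFmtB, List.append_assoc]
      · show (pvBLoop rest _ _).2 = _
        rw [hrec.2.1]
        show w + 11 + _ = w + ((pvFmtB 11 (char_to_val a * 45 + char_to_val b) ++ pvBody (rest.map char_to_val)).length : Int)
        rw [List.length_append]
        push_cast
        omega

-- ---------- characterization of A's fold (header excluded) ----------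
lemma pv_range_two_shift (m : Nat) :
    PySem.List.pyRange 0 ((m : Int) + 2) 2 = 0 :: (PySem.List.pyRange 0 (m : Int) 2).map (· + 2) := by
  rw [PySem.List.pyRange_of_pos 0 ((m : Int) + 2) (by norm_num), PySem.List.pyRange_of_pos 0 (m : Int) (by norm_num)]
  have h1 : (if (0:Int) < (m : Int) + 2 then (((m : Int) + 2 - 0 + 2 - 1) / 2).toNat else 0)
      = (if (0:Int) < (m : Int) then (((m : Int) - 0 + 2 - 1) / 2).toNat else 0) + 1 := by
    split_ifs <;> omega
  rw [h1, List.range_succ_eq_map]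
  simp only [List.map_cons, List.map_map, Nat.cast_zero, mul_zero, zero_add]
  congr 1

lemma pv_range_one : PySem.List.pyRange 0 (1:Int) 2 = [0] := by
  rw [PySem.List.pyRange_of_pos 0 1 (by norm_num)]
  norm_num

lemma pv_mod_two_add_two (j : Int) : PySem.Int.mod (j + 2) 2 = PySem.Int.mod j 2 := by
  rw [PySem.Int.mod_eq_emod_of_pos (by norm_num), PySem.Int.mod_eq_emod_of_pos (by norm_num)]
  omega

lemma pv_encA : ∀ (cs : List Char) (acc : List Char),
    (if PySem.Int.band ((cs.length : Int)) 1 ≠ 0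
     then ((PySem.List.pyRange 0 (cs.length : Int) 2).foldl
        (fun ans idx =>
          if idx = (cs.length : Int) - 1 then ans
          else ans ++ pvFmtB 11 (char_to_val (PySem.List.pyGetD cs idx ' ') * 45
                                  + char_to_val (PySem.List.pyGetD cs (idx + 1) ' '))) acc)
        ++ pvFmtB 6 (char_to_val (PySem.List.pyGetD cs ((cs.length : Int) - 1) ' '))
     else ((PySem.List.pyRange 0 (cs.length : Int) 2).foldl
        (fun ans idx =>
          if idx = (cs.length : Int) - 1 then ans
          else ans ++ pvFmtB 11 (char_to_val (PySem.List.pyGetD cs idx ' ') * 45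
                                  + char_to_val (PySem.List.pyGetD cs (idx + 1) ' '))) acc))
    = acc ++ pvBody (cs.map char_to_val)
  | [], acc => by
      simp [PySem.List.pyRange_of_pos 0 0 (by norm_num : (0 : Int) < 2), pvBody,
            PySem.Int.band]
  | [a], acc => by
      simp only [List.length_singleton, Nat.cast_one, pv_range_one, List.foldl_cons, List.foldl_nil]
      norm_num
      simp [pvBody]
  | a :: b :: rest, acc => by
      have hm : (((a :: b :: rest).length : Int)) = (rest.length : Int) + 2 := by
        push_cast [List.length_cons]; ring
      rw [hm, pv_range_two_shift, List.foldl_cons,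
          if_neg (show ¬((0:Int) = (rest.length : Int) + 2 - 1) by omega), List.foldl_map]
      -- first pair: str[0], str[1]
      have g0 : PySem.List.pyGetD (a :: b :: rest) (0:Int) ' ' = a := PySem.List.pyGetD_zero_cons _ _ _
      have g1 : PySem.List.pyGetD (a :: b :: rest) ((0:Int) + 1) ' ' = b := by
        norm_num
        rw [show ((1:Int)) = ((1:Nat):Int) by norm_num, PySem.List.pyGetD_natCast]
        simp
      rw [g0, g1]
      -- shift the remaining fold from cs-indices to rest-indices
      rw [PySem.List.foldl_congr_mem _ _
        (fun ans idx =>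
          if idx = (rest.length : Int) - 1 then ans
          else ans ++ pvFmtB 11 (char_to_val (PySem.List.pyGetD rest idx ' ') * 45
                                  + char_to_val (PySem.List.pyGetD rest (idx + 1) ' '))) _
        (by
          intro ans idx hidx
          obtain ⟨h0, hlt, -⟩ := (PySem.List.mem_pyRange_iff_of_pos (by norm_num) idx).mp hidx
          obtain ⟨k, rfl⟩ : ∃ k : Nat, idx = (k : Int) := ⟨idx.toNat, (Int.toNat_of_nonneg h0).symm⟩
          have e1 : PySem.List.pyGetD (a :: b :: rest) ((k : Int) + 2) ' '
              = PySem.List.pyGetD rest (k : Int) ' ' := by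
            rw [show ((k : Int) + 2) = ((k + 2 : Nat) : Int) by push_cast; ring,
                PySem.List.pyGetD_natCast, PySem.List.pyGetD_natCast]
            simp
          have e2 : PySem.List.pyGetD (a :: b :: rest) ((k : Int) + 2 + 1) ' '
              = PySem.List.pyGetD rest ((k : Int) + 1) ' ' := by
            rw [show ((k : Int) + 2 + 1) = ((k + 3 : Nat) : Int) by push_cast; ring,
                show ((k : Int) + 1) = ((k + 1 : Nat) : Int) by push_cast; ring,
                PySem.List.pyGetD_natCast, PySem.List.pyGetD_natCast]
            simp
          simp only [e1, e2]
          have hiff : ((k : Int) + 2 = (rest.length : Int) + 2 - 1) ↔ ((k : Int) = (rest.length : Int) - 1) := by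
            omega
          exact if_congr hiff rfl rfl)]
      -- tail: parity and last index agree between cs and rest
      have hband : PySem.Int.band ((rest.length : Int) + 2) 1 = PySem.Int.band ((rest.length : Int)) 1 := by
        rw [PySem.Int.band_one, PySem.Int.band_one, pv_mod_two_add_two]
      rw [hband]
      have hIH := pv_encA rest (acc ++ pvFmtB 11 (char_to_val a * 45 + char_to_val b))
      by_cases hodd : PySem.Int.band ((rest.length : Int)) 1 ≠ 0
      · have hpos : 1 ≤ rest.length := by
          rcases rest with - | ⟨c, t⟩
          · simp [PySem.Int.band] at hodd
          · simp
        have gl : PySem.List.pyGetD (a :: b :: rest) ((rest.length : Int) + 2 - 1) ' '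
            = PySem.List.pyGetD rest ((rest.length : Int) - 1) ' ' := by
          rw [show ((rest.length : Int) + 2 - 1) = ((rest.length + 1 : Nat) : Int) by push_cast; ring,
              show ((rest.length : Int) - 1) = ((rest.length - 1 : Nat) : Int) by push_cast [hpos]; omega,
              PySem.List.pyGetD_natCast, PySem.List.pyGetD_natCast]
          rcases Nat.exists_eq_add_of_le hpos with ⟨j, hj⟩
          simp [hj, Nat.add_comm 1 j]
        rw [if_pos hodd, gl]
        rw [if_pos hodd] at hIH
        rw [hIH]
        simp [pvBody, List.append_assoc]
      · rw [if_neg hodd]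
        rw [if_neg hodd] at hIH
        rw [hIH]
        simp [pvBody, List.append_assoc]

-- ===== VERDICT (by name: the statement is the Claim_ definition above) =====
theorem coding_bit_stream_spec : Claim_equal_coding_bit_stream := by
  intro str hdom hpre
  unfold Spec_coding_bit_stream
  show coding_bit_stream str = coding_bit_stream_alt str
  have hpre' : ∀ c ∈ str.toList, c ∈ pvAlnum := by
    intro c hc
    simpa using List.all_eq_true.mp hpre c hc
  set cs := str.toList with hcs
  set N := cs.length with hN
  -- names for the pieces of B
  set bl : Nat := PySem.Int.bitLength ((N : Int)) with hbl
  set K : Nat := max 9 bl with hK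
  have hK9 : 9 ≤ K := le_max_left _ _
  have hNlt : (N : Int) < 2 ^ K := by
    have h1 := PySem.Int.lt_two_pow_bitLength ((N : Int))
    rw [← hbl] at h1
    simp [Int.natAbs_natCast] at h1
    have h2 : (2:Nat) ^ bl ≤ 2 ^ K := Nat.pow_le_pow_right (by omega) (le_max_right _ _)
    have hcast : ((2 ^ K : Nat) : Int) = 2 ^ K := by push_cast; rfl
    omega
  -- the initial accumulator
  have hfield0 := toBin_field 2 ((N : Int)) K (by omega) (by omega) (by positivity) hNlt
  have hlen0 := toBin_field_length 2 ((N : Int)) K (by omega) (by omega) (by positivity) hNlt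
  have h2bin : PySem.Int.toBinChars 2 = ['1', '0'] := by decide
  -- header: zfill to width K equals zfill to width 9
  have hhdr : PySem.Chars.zfill (PySem.Int.toBinChars ((N : Int))) ((K : Nat) : Int)
      = pvFmtB 9 ((N : Int)) := by
    unfold pvFmtB
    rw [toBinChars_nonneg _ (by positivity)]
    simp only [Int.toNat_natCast]
    rw [pv_zfill_digits _ _ (pvBin_ne_nil N) (pvBin_mem N),
        pv_zfill_digits _ _ (pvBin_ne_nil N) (pvBin_mem N)]
    by_cases hb9 : bl ≤ 9
    · have hK9' : K = 9 := by omega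
      rw [hK9']
      norm_num
    · have hKbl : K = bl := by omega
      have hlen : (pvBin N).length = bl := by
        rw [pvBin_length]
        exact Nat.max_eq_right (by omega)
      rw [hKbl, hlen]
      have e1 : ((bl : Nat) : Int).toNat - bl = 0 := by omega
      have e2 : (9 : Int).toNat - bl = 0 := by omega
      rw [e1, e2]
  -- run the loop characterization
  have hloop := pv_loop_spec cs (2 * 2 ^ K + (N : Int)) (4 + ((K : Nat) : Int))
    (by have h := pow_pos (show (0:Int) < 2 by norm_num) K; omega) hpre'
  set r := pvBLoop cs (2 * 2 ^ K + (N : Int)) (4 + ((K : Nat) : Int)) with hr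
  have hbinr : PySem.Int.toBinChars r.1
      = ['1', '0'] ++ (pvFmtB 9 ((N : Int)) ++ pvBody (cs.map char_to_val)) := by
    rw [hloop.1, hfield0, h2bin, hhdr, List.append_assoc]
  have hlenr : (PySem.Int.toBinChars r.1).length
      = 2 + K + (pvBody (cs.map char_to_val)).length := by
    rw [hbinr]
    simp only [List.length_append, List.length_cons, List.length_nil]
    have : (pvFmtB 9 ((N : Int))).length = K := by
      rw [← hhdr, PySem.Chars.length_zfill]
      have hle : (PySem.Int.toBinChars ((N : Int))).length ≤ K := by
        rw [toBinChars_nonneg _ (by positivity)]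
        simp only [Int.toNat_natCast]
        exact pvBin_length_le N K (by omega) (by exact_mod_cast hNlt)
      omega
    omega
  have hw : r.2 = 4 + ((K : Nat) : Int) + ((pvBody (cs.map char_to_val)).length : Int) :=
    hloop.2.1
  -- B's final format is two leading zeros before the accumulator's digits
  have hBfmt : pvFmtB r.2 r.1
      = "0010".toList ++ pvFmtB 9 ((N : Int)) ++ pvBody (cs.map char_to_val) := by
    unfold pvFmtB
    have hchars : ∀ c ∈ PySem.Int.toBinChars r.1, c = '0' ∨ c = '1' := by
      rw [toBinChars_nonneg _ (by omega : (0:Int) ≤ r.1)]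
      exact pvBin_mem _
    have hne : PySem.Int.toBinChars r.1 ≠ [] := by
      rw [toBinChars_nonneg _ (by omega : (0:Int) ≤ r.1)]
      exact pvBin_ne_nil _
    rw [pv_zfill_digits _ _ hne hchars]
    have hpad : r.2.toNat - (PySem.Int.toBinChars r.1).length = 2 := by
      rw [hlenr]
      omega
    rw [hpad, hbinr]
    have h4 : ("0010".toList : List Char) = ['0', '0', '1', '0'] := by decide
    simp [h4, List.replicate]
    rfl
  -- characterize A's fold with the shared header as initial accumulator
  have hA := pv_encA cs ("0010".toList ++ pvFmtB 9 ((N : Int)))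
  -- assemble both sides
  unfold coding_bit_stream coding_bit_stream_alt
  rw [PySem.Str.len_eq str, ← hcs]
  dsimp only
  rw [← hN]
  have hmax : max 9 (((PySem.Int.bitLength ((N : Int))) : Nat) : Int) = ((K : Nat) : Int) := by
    rw [hK, hbl]
    simp [Nat.cast_max]
  rw [hmax]
  simp only [Int.toNat_natCast]
  rw [← hr, hBfmt, hA]
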